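-- pv_equiv track=rewrite | github.com/MJ-bin/VP-Bench | dataset_pipeline/scripts/add_processed_columns.py | calculate_vulnerable_lines
-- ===== SOURCE A (Python) =====
-- def calculate_vulnerable_lines(vul_func_with_fix: str) -> tuple[str, list[int]]:
--     lines = vul_func_with_fix.split('\n') if isinstance(vul_func_with_fix, str) else []
--     vulnerable_lines_index: list[int] = []
--     processed_func: list[str] = []
--     is_flaw_line = False
--     is_fix_line = False
--     for index, line in enumerate(lines):
--         if is_fix_line:
--             is_fix_line = False
--             continue
--         if is_flaw_line:
--             vulnerable_lines_index.append(len(processed_func))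
--             is_flaw_line = False
--         if line.startswith("//flaw_line_below:"):
--             is_flaw_line = True
--         elif line.startswith('//fix_flaw_line_below:'):
--             is_fix_line = True
--         elif not is_fix_line:
--             processed_func.append(line)
--     return '\n'.join(processed_func), vulnerable_lines_index
-- ===== SOURCE B (Python) =====
-- def calculate_vulnerable_lines(vul_func_with_fix: str) -> tuple[str, list[int]]:
--     FIX = '//fix_flaw_line_below:'
--     FLAW = '//flaw_line_below:'
--     lines = vul_func_with_fix.split('\n') if isinstance(vul_func_with_fix, str) else []
--     # pass 1: skipped[i] == line i is consumed by an active fix marker directly above it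
--     skipped = []
--     fix_active = False
--     for line in lines:
--         skipped.append(fix_active)
--         fix_active = (not fix_active) and line.startswith(FIX)
--     # pass 2: which lines survive, and the running count of survivors up to each line
--     kept = [(not s) and not l.startswith(FLAW) and not l.startswith(FIX)
--             for l, s in zip(lines, skipped)]
--     pref = []
--     cnt = 0
--     for f in kept:
--         cnt += 1 if f else 0
--         pref.append(cnt)
--     # pass 3: one record per active flaw marker that has a successor line
--     vuln = [c for l, s, c in zip(lines[:-1], skipped, pref)
--             if (not s) and l.startswith(FLAW)]
--     text = '\n'.join(l for l, f in zip(lines, kept) if f)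
--     return text, vuln
-- ===== Notes on version B (the rewrite author's own statement) =====
-- stated objective: alternative
-- what changed: Replaced A's single-pass two-flag state machine by staged passes over the line list: a scan computing a mask of lines consumed by an active fix marker, a zip computing kept flags and prefix counts of survivors, then comprehensions assembling the vulnerable indices (active flaw markers with a successor) and the joined text.
import Mathlib
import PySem

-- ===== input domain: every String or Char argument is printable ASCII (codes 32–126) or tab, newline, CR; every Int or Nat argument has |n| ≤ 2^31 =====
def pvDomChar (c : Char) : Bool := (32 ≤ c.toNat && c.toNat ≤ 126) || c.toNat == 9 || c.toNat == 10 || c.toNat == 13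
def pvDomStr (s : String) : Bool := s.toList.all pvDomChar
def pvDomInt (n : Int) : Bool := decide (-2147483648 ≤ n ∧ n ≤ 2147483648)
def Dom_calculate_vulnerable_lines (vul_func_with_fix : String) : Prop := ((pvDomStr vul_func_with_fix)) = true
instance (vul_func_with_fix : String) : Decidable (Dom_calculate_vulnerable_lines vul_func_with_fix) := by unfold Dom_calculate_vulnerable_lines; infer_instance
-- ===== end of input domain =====

-- B replaces A's single-pass two-flag state machine by staged passes (skipped mask, kept flags + prefix counts, then comprehensions); objective: alternative decomposition, same cost.

-- ===== PORT A =====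
-- A's for-loop over enumerate(lines) with state (is_flaw_line, is_fix_line, vulnerable_lines_index, processed_func);
-- the enumerate index is unused by A, so the loop is a structural recursion over the lines.
def pvALoop : List String → Bool → Bool → List Int → List String → List String × List Int
  | [], _, _, vuln, proc => (proc, vuln)
  | line :: rest, is_flaw, is_fix, vuln, proc =>
    if is_fix then
      pvALoop rest is_flaw false vuln proc          -- 'is_fix_line = False; continue'
    else
      let vuln' := if is_flaw then vuln ++ [(proc.length : Int)] else vuln
      let is_flaw' := if is_flaw then false else is_flaw
      if PySem.Str.startswith line "//flaw_line_below:" then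
        pvALoop rest true is_fix vuln' proc
      else if PySem.Str.startswith line "//fix_flaw_line_below:" then
        pvALoop rest is_flaw' true vuln' proc
      else if !is_fix then
        pvALoop rest is_flaw' is_fix vuln' (proc ++ [line])
      else
        pvALoop rest is_flaw' is_fix vuln' proc

def calculate_vulnerable_lines (vul_func_with_fix : String) : String × List Int :=
  -- isinstance(vul_func_with_fix, str) is always true under the type convention
  let lines := (PySem.Str.split? vul_func_with_fix "\n").getD []
  let r := pvALoop lines false false [] []
  (PySem.Str.join "\n" r.1, r.2)

-- ===== PORT B =====
-- pass 1 of Source B: the for-loop appending fix_active before updating it (a scan)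
def pvSkipScan : List String → Bool → List Bool
  | [], _ => []
  | l :: rest, fixA =>
      fixA :: pvSkipScan rest ((!fixA) && PySem.Str.startswith l "//fix_flaw_line_below:")

-- the comprehension body of pass 2's kept flags
def pvKeptFlag (l : String) (s : Bool) : Bool :=
  (!s) && !PySem.Str.startswith l "//flaw_line_below:"
       && !PySem.Str.startswith l "//fix_flaw_line_below:"

-- pass 2 of Source B: the loop accumulating cnt and appending it (prefix counts)
def pvPref : List Bool → Int → List Int
  | [], _ => []
  | f :: rest, cnt =>
      let cnt' := cnt + (if f then 1 else 0)
      cnt' :: pvPref rest cnt'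

def calculate_vulnerable_lines_alt (vul_func_with_fix : String) : String × List Int :=
  let lines := (PySem.Str.split? vul_func_with_fix "\n").getD []
  let skipped := pvSkipScan lines false
  let kept := List.zipWith pvKeptFlag lines skipped
  let pref := pvPref kept 0
  -- lines[:-1] is List.dropLast (exact: drops the last element; [] stays []); zip truncates like Python's
  let vuln := (List.zip lines.dropLast (List.zip skipped pref)).filterMap
      (fun p => if (!p.2.1) && PySem.Str.startswith p.1 "//flaw_line_below:" then some p.2.2 else none)
  let text := PySem.Str.join "\n"
      ((List.zip lines kept).filterMap (fun p => if p.2 then some p.1 else none))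
  (text, vuln)

-- ===== PRECONDITION & SPEC =====
def Spec_calculate_vulnerable_lines (vul_func_with_fix : String) (out : String × List Int) : Prop := out = calculate_vulnerable_lines_alt vul_func_with_fix
instance (vul_func_with_fix : String) (out : String × List Int) : Decidable (Spec_calculate_vulnerable_lines vul_func_with_fix out) := by unfold Spec_calculate_vulnerable_lines; infer_instance

-- ===== CLAIM (what is proved, stated in full; the proofs are below) =====
def Claim_equal_calculate_vulnerable_lines : Prop := ∀ (vul_func_with_fix : String), Dom_calculate_vulnerable_lines vul_func_with_fix → Spec_calculate_vulnerable_lines vul_func_with_fix (calculate_vulnerable_lines vul_func_with_fix)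

-- ===== LEMMAS AND PROOFS =====

-- proof-only reference recursion: an index-suffix form of the same filter, the common
-- middle point between A's flag machine and B's staged passes
def pvRef : List String → List String → List Int → List String × List Int
  | [], proc, vuln => (proc, vuln)
  | line :: rest, proc, vuln =>
    if PySem.Str.startswith line "//fix_flaw_line_below:" then
      pvRef rest.tail proc vuln
    else if PySem.Str.startswith line "//flaw_line_below:" then
      pvRef rest proc (if rest.length > 0 then vuln ++ [(proc.length : Int)] else vuln)
    else
      pvRef rest (proc ++ [line]) vuln
  termination_by l _ _ => l.length
  decreasing_by all_goals (simp [List.length_tail]; try omega)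

-- a line starting with the fix marker cannot also start with the flaw marker (they differ at 'i' vs 'l')
lemma pv_not_both (l : String)
    (h : PySem.Str.startswith l "//fix_flaw_line_below:" = true) :
    PySem.Str.startswith l "//flaw_line_below:" = false := by
  by_contra hc
  rw [Bool.not_eq_false] at hc
  simp only [PySem.Str.startswith_eq] at h hc
  rw [PySem.Chars.startswith_iff] at h hc
  have hle : ("//flaw_line_below:".toList).length ≤ ("//fix_flaw_line_below:".toList).length := by decide
  have := List.prefix_of_prefix_length_le hc h hle
  revert this; decide

-- and conversely
lemma pv_not_both' (l : String)
    (h : PySem.Str.startswith l "//flaw_line_below:" = true) :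
    PySem.Str.startswith l "//fix_flaw_line_below:" = false := by
  by_contra hc
  rw [Bool.not_eq_false] at hc
  exact absurd h (by simpa using pv_not_both l hc)

-- after a flaw marker, A's deferred append at the start of the next iteration equals
-- appending eagerly and continuing with both flags cleared
lemma pv_aFlaw (r : String) (rs : List String) (vuln : List Int) (proc : List String) :
    pvALoop (r :: rs) true false vuln proc
      = pvALoop (r :: rs) false false (vuln ++ [(proc.length : Int)]) proc := by
  simp [pvALoop]

lemma pv_key : ∀ (n : Nat) (ls : List String) (vuln : List Int) (proc : List String),
    ls.length ≤ n → pvALoop ls false false vuln proc = pvRef ls proc vuln := by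
  intro n
  induction n with
  | zero =>
    intro ls vuln proc h
    have : ls = [] := List.eq_nil_of_length_eq_zero (Nat.le_zero.mp h)
    subst this; simp [pvALoop, pvRef]
  | succ n ih =>
    intro ls vuln proc h
    cases ls with
    | nil => simp [pvALoop, pvRef]
    | cons line rest =>
      by_cases hfix : PySem.Str.startswith line "//fix_flaw_line_below:" = true
      · have hflaw := pv_not_both line hfix
        simp only [pvALoop, pvRef, hfix, hflaw, if_true, if_false, Bool.false_eq_true]
        cases rest with
        | nil => simp [pvALoop, pvRef]
        | cons r rs =>
          simp only [pvALoop, if_true, List.tail_cons]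
          exact ih rs vuln proc (by simp at h; omega)
      · by_cases hflaw : PySem.Str.startswith line "//flaw_line_below:" = true
        · simp only [pvALoop, pvRef, hfix, hflaw, Bool.false_eq_true, if_true, ite_false]
          cases rest with
          | nil => simp [pvALoop, pvRef]
          | cons r rs =>
            rw [pv_aFlaw]
            have := ih (r :: rs) (vuln ++ [(proc.length : Int)]) proc (by simp at h ⊢; omega)
            simpa using this
        · simp only [pvALoop, pvRef, hfix, hflaw, Bool.false_eq_true, ite_false, Bool.not_false,
            if_true]
          exact ih rest vuln (proc ++ [line]) (by simp at h; omega)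

-- abbreviations for B's three staged results on a suffix, with the survivor count offset c
def pvBKept (ls : List String) : List String :=
  (List.zip ls (List.zipWith pvKeptFlag ls (pvSkipScan ls false))).filterMap
    (fun p => if p.2 then some p.1 else none)

def pvBVuln (ls : List String) (c : Int) : List Int :=
  (List.zip ls.dropLast
      (List.zip (pvSkipScan ls false) (pvPref (List.zipWith pvKeptFlag ls (pvSkipScan ls false)) c))).filterMap
    (fun p => if (!p.2.1) && PySem.Str.startswith p.1 "//flaw_line_below:" then some p.2.2 else none)

-- fix case
lemma pvK_fix (line r : String) (rs : List String)
    (h : PySem.Str.startswith line "//fix_flaw_line_below:" = true) :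
    pvBKept (line :: r :: rs) = pvBKept rs := by
  have h2 := pv_not_both line h
  simp [PySem.Str.startswith_eq] at h h2
  simp [pvBKept, pvSkipScan, pvKeptFlag, h, h2]

lemma pvK_fix_nil (line : String)
    (h : PySem.Str.startswith line "//fix_flaw_line_below:" = true) :
    pvBKept [line] = [] := by
  have h2 := pv_not_both line h
  simp [PySem.Str.startswith_eq] at h h2
  simp [pvBKept, pvSkipScan, pvKeptFlag, h, h2]

lemma pvV_fix (line r : String) (rs : List String) (c : Int)
    (h : PySem.Str.startswith line "//fix_flaw_line_below:" = true) :
    pvBVuln (line :: r :: rs) c = pvBVuln rs c := by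
  have h2 := pv_not_both line h
  simp [PySem.Str.startswith_eq] at h h2
  cases rs with
  | nil => simp [pvBVuln, pvSkipScan, pvKeptFlag, pvPref, h, h2]
  | cons r2 rs2 => simp [pvBVuln, pvSkipScan, pvKeptFlag, pvPref, h, h2]

lemma pvV_fix_nil (line : String) (c : Int) :
    pvBVuln [line] c = [] := by
  simp [pvBVuln]

-- flaw case
lemma pvK_flaw (line : String) (rest : List String)
    (h : PySem.Str.startswith line "//flaw_line_below:" = true) :
    pvBKept (line :: rest) = pvBKept rest := by
  have h2 := pv_not_both' line h
  simp [PySem.Str.startswith_eq] at h h2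
  simp [pvBKept, pvSkipScan, pvKeptFlag, h, h2]

lemma pvV_flaw (line r : String) (rs : List String) (c : Int)
    (h : PySem.Str.startswith line "//flaw_line_below:" = true) :
    pvBVuln (line :: r :: rs) c = c :: pvBVuln (r :: rs) c := by
  have h2 := pv_not_both' line h
  simp [PySem.Str.startswith_eq] at h h2
  simp [pvBVuln, pvSkipScan, pvKeptFlag, pvPref, h, h2]

-- plain case
lemma pvK_plain (line : String) (rest : List String)
    (h1 : PySem.Str.startswith line "//flaw_line_below:" = false)
    (h2 : PySem.Str.startswith line "//fix_flaw_line_below:" = false) :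
    pvBKept (line :: rest) = line :: pvBKept rest := by
  simp [PySem.Str.startswith_eq] at h1 h2
  simp [pvBKept, pvSkipScan, pvKeptFlag, h1, h2]

lemma pvV_plain (line : String) (rest : List String) (c : Int)
    (h1 : PySem.Str.startswith line "//flaw_line_below:" = false)
    (h2 : PySem.Str.startswith line "//fix_flaw_line_below:" = false) :
    pvBVuln (line :: rest) c = pvBVuln rest (c + 1) := by
  simp [PySem.Str.startswith_eq] at h1 h2
  cases rest with
  | nil => simp [pvBVuln]
  | cons r rs => simp [pvBVuln, pvSkipScan, pvKeptFlag, pvPref, h1, h2]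

-- one-step unfolding lemmas for pvRef
lemma pvRef_step_fix (line : String) (rest proc : List String) (vuln : List Int)
    (h : PySem.Str.startswith line "//fix_flaw_line_below:" = true) :
    pvRef (line :: rest) proc vuln = pvRef rest.tail proc vuln := by
  rw [pvRef.eq_def]; simp only [h, if_true]

lemma pvRef_step_flaw (line : String) (rest proc : List String) (vuln : List Int)
    (h1 : PySem.Str.startswith line "//fix_flaw_line_below:" = false)
    (h2 : PySem.Str.startswith line "//flaw_line_below:" = true) :
    pvRef (line :: rest) proc vuln
      = pvRef rest proc (if rest.length > 0 then vuln ++ [(proc.length : Int)] else vuln) := by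
  rw [pvRef.eq_def]; simp only [h1, h2, Bool.false_eq_true, if_false, if_true]

lemma pvRef_step_plain (line : String) (rest proc : List String) (vuln : List Int)
    (h1 : PySem.Str.startswith line "//fix_flaw_line_below:" = false)
    (h2 : PySem.Str.startswith line "//flaw_line_below:" = false) :
    pvRef (line :: rest) proc vuln = pvRef rest (proc ++ [line]) vuln := by
  rw [pvRef.eq_def]; simp only [h1, h2, Bool.false_eq_true, if_false]

lemma pv_ref_eq_b : ∀ (n : Nat) (ls : List String) (proc : List String) (vuln : List Int),
    ls.length ≤ n →
    pvRef ls proc vuln = (proc ++ pvBKept ls, vuln ++ pvBVuln ls (proc.length : Int)) := by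
  intro n
  induction n with
  | zero =>
    intro ls proc vuln h
    have : ls = [] := List.eq_nil_of_length_eq_zero (Nat.le_zero.mp h)
    subst this; simp [pvRef, pvBKept, pvBVuln]
  | succ n ih =>
    intro ls proc vuln h
    cases ls with
    | nil => simp [pvRef, pvBKept, pvBVuln]
    | cons line rest =>
      by_cases hfix : PySem.Str.startswith line "//fix_flaw_line_below:" = true
      · rw [pvRef_step_fix line rest proc vuln hfix]
        cases rest with
        | nil =>
          rw [pvK_fix_nil line hfix, pvV_fix_nil]
          simp [pvRef]
        | cons r rs =>
          rw [pvK_fix line r rs hfix, pvV_fix line r rs _ hfix, List.tail_cons]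
          exact ih rs proc vuln (by simp at h; omega)
      · have hfix' : PySem.Str.startswith line "//fix_flaw_line_below:" = false := by
          simpa using hfix
        by_cases hflaw : PySem.Str.startswith line "//flaw_line_below:" = true
        · rw [pvRef_step_flaw line rest proc vuln hfix' hflaw]
          cases rest with
          | nil =>
            rw [pvK_flaw line [] hflaw, pvV_fix_nil]
            simp [pvRef, pvBKept]
          | cons r rs =>
            rw [pvK_flaw line (r :: rs) hflaw, pvV_flaw line r rs _ hflaw]
            simp only [List.length_cons, gt_iff_lt, Nat.succ_pos, if_true]
            rw [ih (r :: rs) proc (vuln ++ [(proc.length : Int)]) (by simp at h ⊢; omega)]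
            simp
        · have hflaw' : PySem.Str.startswith line "//flaw_line_below:" = false := by
            simpa using hflaw
          rw [pvRef_step_plain line rest proc vuln hfix' hflaw',
              pvK_plain line rest hflaw' hfix', pvV_plain line rest _ hflaw' hfix']
          rw [ih rest (proc ++ [line]) vuln (by simp at h; omega)]
          simp

-- ===== VERDICT (by name: the statement is the Claim_ definition above) =====
theorem calculate_vulnerable_lines_spec : Claim_equal_calculate_vulnerable_lines := by
  intro s _
  simp only [Spec_calculate_vulnerable_lines, calculate_vulnerable_lines,
    calculate_vulnerable_lines_alt]
  rw [pv_key ((PySem.Str.split? s "\n").getD []).length _ _ _ le_rfl,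
      pv_ref_eq_b ((PySem.Str.split? s "\n").getD []).length _ _ _ le_rfl]
  rfl
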